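-- pv_equiv track=rewrite | github.com/makimaki1006/ShiftAnalysis | E2_CONTINUOUS_IMPROVEMENT.py | _has_long_functions
-- ===== SOURCE A (Python) =====
-- def _has_long_functions(content: str) -> bool:
--     """長すぎる関数の検出"""
--     lines = content.split('\n')
--     in_function = False
--     function_lines = 0
--
--     for line in lines:
--         if line.strip().startswith('def '):
--             if in_function and function_lines > 50:
--                 return True
--             in_function = True
--             function_lines = 0
--         elif in_function:
--             function_lines += 1
--
--     return in_function and function_lines > 50
-- ===== SOURCE B (Python) =====
-- def _has_long_functions(content: str) -> bool:
--     """長すぎる関数の検出"""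
--     lines = content.split('\n')
--     positions = [i for i, line in enumerate(lines) if line.strip().startswith('def ')]
--     if not positions:
--         return False
--     positions = positions + [len(lines)]
--     return any(q - p - 1 > 50 for p, q in zip(positions, positions[1:]))
-- ===== Notes on version B (the rewrite author's own statement) =====
-- stated objective: alternative
-- what changed: Replaces the stateful in_function/function_lines scan with an index-table approach: collect the line indices of all 'def ' headers, append len(lines) as a sentinel, and test whether any consecutive gap exceeds 50 lines.
import Mathlib
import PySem

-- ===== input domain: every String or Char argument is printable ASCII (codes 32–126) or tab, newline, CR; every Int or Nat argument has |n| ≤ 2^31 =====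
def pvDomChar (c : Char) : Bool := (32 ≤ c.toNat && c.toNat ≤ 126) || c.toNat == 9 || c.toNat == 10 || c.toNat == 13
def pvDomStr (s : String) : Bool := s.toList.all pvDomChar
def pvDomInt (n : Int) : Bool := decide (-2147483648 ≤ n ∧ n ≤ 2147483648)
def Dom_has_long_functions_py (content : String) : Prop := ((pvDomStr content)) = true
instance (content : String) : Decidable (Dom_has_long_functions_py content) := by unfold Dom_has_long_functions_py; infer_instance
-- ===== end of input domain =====

-- B replaces A's stateful in_function/function_lines scan by an index table of 'def ' lines
-- plus a gap check between consecutive def positions (alternative decomposition, same cost).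

-- shared by both ports: line.strip().startswith('def ')
def pvIsDefLine (line : String) : Bool :=
  PySem.Str.startswith (PySem.Str.strip line) "def "

-- ===== PORT A =====
-- the for-loop of A, state = (in_function, function_lines); final return is the [] case
def pvHlLoop (lines : List String) (inF : Bool) (cnt : Int) : Bool :=
  match lines with
  | [] => inF && 50 < cnt
  | line :: rest =>
    if pvIsDefLine line then
      if inF && 50 < cnt then true
      else pvHlLoop rest true 0
    else
      pvHlLoop rest inF (if inF then cnt + 1 else cnt)

def has_long_functions_py (content : String) : Bool :=
  -- split? is `some` here since the separator "\n" is nonempty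
  let lines := (PySem.Str.split? content "\n").getD []
  pvHlLoop lines false 0

-- ===== PORT B =====
def has_long_functions_py_alt (content : String) : Bool :=
  -- split? is `some` here since the separator "\n" is nonempty
  let lines := (PySem.Str.split? content "\n").getD []
  let positions := (PySem.List.enumerate lines 0).filterMap
    (fun pr => if pvIsDefLine pr.2 then some pr.1 else none)
  if positions.isEmpty then false
  else
    let ps := positions ++ [(lines.length : Int)]
    (ps.zip ps.tail).any (fun pr => 50 < pr.2 - pr.1 - 1)

-- ===== PRECONDITION & SPEC =====
def Spec_has_long_functions_py (content : String) (out : Bool) : Prop := out = has_long_functions_py_alt content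
instance (content : String) (out : Bool) : Decidable (Spec_has_long_functions_py content out) := by unfold Spec_has_long_functions_py; infer_instance

-- ===== CLAIM (what is proved, stated in full; the proofs are below) =====
def Claim_equal_has_long_functions_py : Prop := ∀ (content : String), Dom_has_long_functions_py content → Spec_has_long_functions_py content (has_long_functions_py content)

-- ===== LEMMAS AND PROOFS =====

-- gap check after a def header, with cnt lines already counted
def pvG (ls : List String) (c : Int) : Bool :=
  match ls with
  | [] => 50 < c
  | l :: r => if pvIsDefLine l then ((50 < c) || pvG r 0) else pvG r (c + 1)

-- skip to the first def header, then gap-check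
def pvS (ls : List String) : Bool :=
  match ls with
  | [] => false
  | l :: r => if pvIsDefLine l then pvG r 0 else pvS r

def pvPos (ls : List String) (t : Int) : List Int :=
  (PySem.List.enumerate ls t).filterMap (fun pr => if pvIsDefLine pr.2 then some pr.1 else none)

def pvAnyPairs (L : List Int) : Bool :=
  (L.zip L.tail).any (fun pr => 50 < pr.2 - pr.1 - 1)

theorem pvPos_cons_def (l : String) (r : List String) (t : Int) (hd : pvIsDefLine l = true) :
    pvPos (l :: r) t = t :: pvPos r (t + 1) := by
  simp [pvPos, PySem.List.enumerate_cons, hd]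

theorem pvPos_cons_nodef (l : String) (r : List String) (t : Int) (hd : ¬ pvIsDefLine l = true) :
    pvPos (l :: r) t = pvPos r (t + 1) := by
  simp [pvPos, PySem.List.enumerate_cons, hd]

theorem pvHlLoop_true (ls : List String) (c : Int) : pvHlLoop ls true c = pvG ls c := by
  induction ls generalizing c with
  | nil => simp [pvHlLoop, pvG]
  | cons l r ih =>
    simp only [pvHlLoop, pvG, Bool.true_and]
    by_cases hd : pvIsDefLine l <;> by_cases hc : (50:Int) < c <;>
      simp [hd, hc, ih]

theorem pvHlLoop_false (ls : List String) : pvHlLoop ls false 0 = pvS ls := by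
  induction ls with
  | nil => simp [pvHlLoop, pvS]
  | cons l r ih =>
    simp only [pvHlLoop, pvS, Bool.false_and]
    by_cases hd : pvIsDefLine l <;> simp [hd, ih, pvHlLoop_true]

theorem pvAnyPairs_cons_cons (a b : Int) (t : List Int) :
    pvAnyPairs (a :: b :: t) = ((50 < b - a - 1 : Bool) || pvAnyPairs (b :: t)) := by
  simp [pvAnyPairs]

theorem pvAnyPairs_in (ls : List String) (p c : Int) :
    pvAnyPairs (p :: (pvPos ls (p + c + 1) ++ [p + c + 1 + ls.length])) = pvG ls c := by
  induction ls generalizing p c with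
  | nil => simp [pvPos, pvAnyPairs, pvG, PySem.List.enumerate]; omega
  | cons l r ih =>
    by_cases hd : pvIsDefLine l
    · have h3 := ih (p + c + 1) 0
      rw [show p + c + 1 + 0 + 1 = p + c + 1 + 1 from by ring] at h3
      rw [pvPos_cons_def l r _ hd,
          show p + c + 1 + ((l :: r).length : Int) = p + c + 1 + 1 + (r.length : Int) from by
            simp; omega]
      rw [List.cons_append, pvAnyPairs_cons_cons, h3]
      simp only [pvG, hd, if_true]
      congr 1
      simp only [decide_eq_decide]
      omega
    · have h3 := ih p (c + 1)
      rw [show p + (c + 1) + 1 = p + c + 1 + 1 from by ring] at h3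
      rw [pvPos_cons_nodef l r _ hd,
          show p + c + 1 + ((l :: r).length : Int) = p + c + 1 + 1 + (r.length : Int) from by
            simp; omega,
          h3]
      simp [pvG, hd]

theorem pvPos_spec (ls : List String) (t : Int) :
    (if (pvPos ls t).isEmpty then false
     else pvAnyPairs (pvPos ls t ++ [t + ls.length])) = pvS ls := by
  induction ls generalizing t with
  | nil => simp [pvPos, PySem.List.enumerate, pvS]
  | cons l r ih =>
    by_cases hd : pvIsDefLine l
    · rw [pvPos_cons_def l r _ hd]
      have h := pvAnyPairs_in r t 0
      rw [show t + 0 + 1 = t + 1 from by ring] at h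
      simp only [List.isEmpty_cons, Bool.false_eq_true, if_neg, not_false_iff, List.cons_append]
      rw [show t + ((l :: r).length : Int) = t + 1 + (r.length : Int) from by simp; omega, h]
      simp [pvS, hd]
    · rw [pvPos_cons_nodef l r _ hd]
      have h := ih (t + 1)
      rw [show t + ((l :: r).length : Int) = t + 1 + (r.length : Int) from by simp; omega, h]
      simp [pvS, hd]

-- ===== VERDICT (by name: the statement is the Claim_ definition above) =====
theorem has_long_functions_py_spec : Claim_equal_has_long_functions_py := by
  intro content _
  unfold Spec_has_long_functions_py has_long_functions_py has_long_functions_py_alt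
  rw [pvHlLoop_false]
  have h := pvPos_spec ((PySem.Str.split? content "\n").getD []) 0
  simp only [pvPos, pvAnyPairs, zero_add] at h
  simpa using h.symm
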